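-- pv_equiv track=rewrite | github.com/little-isaac/scaler | intermediate/day_37/hw_string_operation.py | solve
-- ===== SOURCE A (Python) =====
-- def solve(A):
--     A = list(A)
--     n = len(A)
--     upperRange = [ord('A'),ord('Z')]
--     vowels = [ord('a'),ord('e'),ord('i'),ord('o'),ord('u')]
--     for i in range(n):
--         ele = A[i]
--         aci = ord(ele)
--         if aci >= upperRange[0] and aci <= upperRange[1]:
--             # delete element
--             A[i] = ""
--         elif aci in vowels:
--             # replace element
--             A[i] = "#"
--     A.extend(A)
--     return "".join(A)
-- ===== SOURCE B (Python) =====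
-- def _go(t):
--     # divide and conquer: transform halves independently and concatenate
--     if len(t) <= 1:
--         if t == "" or "A" <= t <= "Z":
--             return ""
--         if t in "aeiou":
--             return "#"
--         return t
--     m = len(t) // 2
--     return _go(t[:m]) + _go(t[m:])
--
-- def solve(A):
--     r = _go("".join(A))
--     return r + r
-- ===== Notes on version B (the rewrite author's own statement) =====
-- stated objective: alternative
-- what changed: Replaces A's linear indexed loop with per-character if/elif branching by a divide-and-conquer recursion that splits the string in half, transforms each half independently (base case of length <= 1 classified by string comparison/substring test) and concatenates; correct because the character map distributes over concatenation.
import Mathlib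
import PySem

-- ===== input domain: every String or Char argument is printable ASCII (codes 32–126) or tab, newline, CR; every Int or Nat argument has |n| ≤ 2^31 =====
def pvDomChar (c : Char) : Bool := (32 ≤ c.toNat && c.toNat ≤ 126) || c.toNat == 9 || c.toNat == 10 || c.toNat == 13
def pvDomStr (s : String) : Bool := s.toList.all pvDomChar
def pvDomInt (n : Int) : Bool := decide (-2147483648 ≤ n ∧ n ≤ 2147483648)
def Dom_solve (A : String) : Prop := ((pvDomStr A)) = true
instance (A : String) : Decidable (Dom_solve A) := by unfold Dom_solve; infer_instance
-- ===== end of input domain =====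

-- B replaces A's linear indexed loop by a divide-and-conquer recursion over string halves
-- (the per-character map distributes over concatenation); objective: alternative.

-- ===== PORT A =====
-- A maps each character to "", "#" or itself (a one-char string), doubles the list, joins.
def solve (A : String) : String :=
  let l := A.toList.map (fun ele =>
    let aci : Int := (ele.toNat : Int)
    if 65 ≤ aci ∧ aci ≤ 90 then ""                              -- 'A'..'Z' → delete
    else if aci ∈ ([97, 101, 105, 111, 117] : List Int) then "#"  -- vowel → "#"
    else String.ofList [ele])
  PySem.Str.join "" (l ++ l)

-- ===== PORT B =====
-- _go(t): length ≤ 1 → classify ('' or "A" ≤ t ≤ "Z" → delete; t in "aeiou" → '#'; else keep);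
-- otherwise recurse on the two halves and concatenate.  Python's string '≤' is code-point
-- lexicographic = Lean's '≤' on List Char; t[:m]/t[m:] with 0 ≤ m ≤ len t are exactly take/drop.
def pvGo (t : List Char) : List Char :=
  if t.length ≤ 1 then
    if t = [] ∨ (['A'] ≤ t ∧ t ≤ ['Z']) then []
    else if PySem.Chars.isIn t ("aeiou".toList) then ['#']
    else t
  else
    pvGo (t.take (t.length / 2)) ++ pvGo (t.drop (t.length / 2))
termination_by t.length
decreasing_by
  · simp only [List.length_take]; omega
  · simp only [List.length_drop]; omega

def solve_alt (A : String) : String :=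
  let r := pvGo A.toList            -- "".join(A) is A itself for a string input
  String.ofList (r ++ r)            -- r + r

-- ===== PRECONDITION & SPEC =====
def Spec_solve (A : String) (out : String) : Prop := out = solve_alt A
instance (A : String) (out : String) : Decidable (Spec_solve A out) := by unfold Spec_solve; infer_instance

-- ===== CLAIM =====
def Claim_equal_solve : Prop := ∀ (A : String), Dom_solve A → Spec_solve A (solve A)

-- ===== LEMMAS AND PROOFS =====

-- the common per-character action
def pvAct (c : Char) : List Char :=
  if 65 ≤ c.toNat ∧ c.toNat ≤ 90 then []
  else if c.toNat = 97 ∨ c.toNat = 101 ∨ c.toNat = 105 ∨ c.toNat = 111 ∨ c.toNat = 117 then ['#']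
  else [c]

theorem char_le_iff (c d : Char) : c ≤ d ↔ c.toNat ≤ d.toNat :=
  ⟨fun h => h, fun h => h⟩

theorem singleton_le_iff (c d : Char) : ([c] : List Char) ≤ [d] ↔ c ≤ d := by
  constructor
  · intro h
    rcases lt_or_ge d c with hlt | hle
    · exact absurd h (not_le_of_gt (List.Lex.rel hlt))
    · exact hle
  · intro h
    rcases lt_or_eq_of_le h with hlt | heq
    · exact le_of_lt (List.Lex.rel hlt)
    · simp [heq]

theorem mem_vowels_iff (c : Char) : c ∈ ("aeiou".toList) ↔
    (c.toNat = 97 ∨ c.toNat = 101 ∨ c.toNat = 105 ∨ c.toNat = 111 ∨ c.toNat = 117) := by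
  have hs : "aeiou".toList = ['a','e','i','o','u'] := by decide
  have conv : ∀ (n : Nat) (d : Char), d.toNat = n → (c = d ↔ c.toNat = n) := by
    intro n d hd
    constructor
    · intro h; rw [h, hd]
    · intro h
      exact Char.ext (UInt32.toNat_inj.mp
        (by rw [show c.val.toNat = c.toNat from rfl, show d.val.toNat = d.toNat from rfl, h, hd]))
  rw [hs]
  simp only [List.mem_cons, List.not_mem_nil, or_false,
    conv 97 'a' (by decide), conv 101 'e' (by decide), conv 105 'i' (by decide),
    conv 111 'o' (by decide), conv 117 'u' (by decide)]

theorem pvGo_singleton_eq (c : Char) : pvGo [c] = pvAct c := by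
  have hup : (['A'] ≤ ([c] : List Char) ∧ ([c] : List Char) ≤ ['Z']) ↔
      (65 ≤ c.toNat ∧ c.toNat ≤ 90) := by
    rw [singleton_le_iff, singleton_le_iff, char_le_iff, char_le_iff]
    have h1 : ('A').toNat = 65 := by decide
    have h2 : ('Z').toNat = 90 := by decide
    omega
  have hvow : PySem.Chars.isIn [c] ("aeiou".toList) = true ↔
      (c.toNat = 97 ∨ c.toNat = 101 ∨ c.toNat = 105 ∨ c.toNat = 111 ∨ c.toNat = 117) := by
    rw [PySem.Chars.isIn_iff_infix, List.singleton_infix_iff, mem_vowels_iff]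
  have hne : ([c] : List Char) ≠ [] := by simp
  rw [pvGo, if_pos (by simp)]
  unfold pvAct
  by_cases h1 : 65 ≤ c.toNat ∧ c.toNat ≤ 90
  · rw [if_pos (Or.inr (hup.mpr h1)), if_pos h1]
  · rw [if_neg (fun h => h.elim hne (fun hc => h1 (hup.mp hc))), if_neg h1]
    by_cases h2 : c.toNat = 97 ∨ c.toNat = 101 ∨ c.toNat = 105 ∨ c.toNat = 111 ∨ c.toNat = 117
    · rw [if_pos (hvow.mpr h2), if_pos h2]
    · rw [if_neg (fun hh => h2 (hvow.mp hh)), if_neg h2]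

theorem pvGo_eq_flatMap (t : List Char) : pvGo t = t.flatMap pvAct := by
  induction hn : t.length using Nat.strong_induction_on generalizing t with
  | _ n ih =>
    subst hn
    match t with
    | [] => rw [pvGo]; simp
    | [c] => simpa using pvGo_singleton_eq c
    | a :: b :: rest =>
      rw [pvGo]
      have hlen : ¬ (a :: b :: rest).length ≤ 1 := by simp
      rw [if_neg hlen]
      set t := a :: b :: rest with ht
      have htake : (t.take (t.length / 2)).length < t.length := by
        simp only [List.length_take, ht, List.length_cons]; omega
      have hdrop : (t.drop (t.length / 2)).length < t.length := by
        simp only [List.length_drop, ht, List.length_cons]; omega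
      rw [ih _ htake _ rfl, ih _ hdrop _ rfl, ← List.flatMap_append,
        List.take_append_drop]

theorem join_empty_eq_flatten (ls : List (List Char)) :
    PySem.Chars.join [] ls = ls.flatten := by
  simp [PySem.Chars.join, List.intercalate]
  induction ls with
  | nil => rfl
  | cons h t ih => cases t <;> simp_all [List.intersperse]

-- A's branch agrees with pvAct (character level; no domain hypothesis needed)
theorem solveA_branch_toList (c : Char) :
    (if 65 ≤ ((c.toNat : Int)) ∧ ((c.toNat : Int)) ≤ 90 then ""
     else if ((c.toNat : Int)) ∈ ([97, 101, 105, 111, 117] : List Int) then "#"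
     else String.ofList [c]).toList = pvAct c := by
  simp only [pvAct, List.mem_cons, List.not_mem_nil, or_false]
  split_ifs <;> simp_all <;> omega

-- ===== VERDICT =====
theorem solve_spec : Claim_equal_solve := by
  intro A _
  show solve A = solve_alt A
  apply String.ext
  show (solve A).toList = (solve_alt A).toList
  simp only [solve, solve_alt, PySem.Str.join, String.toList_ofList,
    pvGo_eq_flatMap, List.map_append, List.map_map, List.flatMap]
  rw [show ("".toList : List Char) = [] from rfl, join_empty_eq_flatten, List.flatten_append]
  have key : (A.toList.map (String.toList ∘ fun ele =>
      (if 65 ≤ ((ele.toNat : Int)) ∧ ((ele.toNat : Int)) ≤ 90 then ""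
       else if ((ele.toNat : Int)) ∈ ([97, 101, 105, 111, 117] : List Int) then "#"
       else String.ofList [ele]))).flatten = (A.toList.map pvAct).flatten := by
    congr 1
    exact List.map_congr_left (fun c _ => solveA_branch_toList c)
  rw [key]
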